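-- pv_equiv track=rewrite | github.com/15Andrew43/StepicPythonPractic | table2.py | Strip
-- ===== SOURCE A (Python) =====
-- def Strip(line):
-- 	start = end = -1
-- 	for ind, ch in enumerate(line):
-- 		if ch.isdigit():
-- 			start = ind
-- 			break
-- 	else:
-- 		return None
-- 	for i in range(len(line)-1, -1, -1):
-- 		if line[i].isdigit():
-- 			end = i
-- 			break
-- 	return line[start : end+1]
-- ===== SOURCE B (Python) =====
-- def Strip(line):
-- 	first = last = None
-- 	for ind, ch in enumerate(line):
-- 		if ch.isdigit():
-- 			if first is None:
-- 				first = ind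
-- 			last = ind
-- 	if first is None:
-- 		return None
-- 	return line[first : last+1]
-- ===== Notes on version B (the rewrite author's own statement) =====
-- stated objective: simpler
-- what changed: B does a single forward pass tracking the first and last digit indices, replacing A's forward scan plus a separate backward index scan with for/else.
import Mathlib
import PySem

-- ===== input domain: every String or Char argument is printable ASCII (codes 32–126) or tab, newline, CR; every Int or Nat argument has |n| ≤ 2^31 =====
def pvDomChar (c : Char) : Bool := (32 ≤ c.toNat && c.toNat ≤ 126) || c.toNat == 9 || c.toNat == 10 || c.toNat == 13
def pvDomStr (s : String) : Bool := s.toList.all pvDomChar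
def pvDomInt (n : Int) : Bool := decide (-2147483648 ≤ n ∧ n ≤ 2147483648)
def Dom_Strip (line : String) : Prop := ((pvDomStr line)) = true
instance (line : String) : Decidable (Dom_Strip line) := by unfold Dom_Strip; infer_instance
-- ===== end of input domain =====

-- B replaces A's forward scan plus separate backward scan by one forward pass tracking both boundary indices (objective: simpler).

-- ===== PORT A =====
-- first loop: 'for ind, ch in enumerate(line): if ch.isdigit(): start = ind; break / else: return None'
def stripFwdA : List (Int × Char) → Option Int
  | [] => none
  | (ind, ch) :: rest => if PySem.Chars.isdigit ch then some ind else stripFwdA rest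

-- second loop: 'for i in range(len(line)-1, -1, -1): if line[i].isdigit(): end = i; break' (end stays -1 if no break)
def stripBwdA (cs : List Char) : List Int → Int
  | [] => -1
  | i :: rest => if PySem.Chars.isdigit (PySem.List.pyGetD cs i ' ') then i else stripBwdA cs rest

def Strip (line : String) : Option String :=
  let cs := line.toList
  match stripFwdA (PySem.List.enumerate cs 0) with
  | none => none
  | some start =>
      let e := stripBwdA cs (PySem.List.pyRange (PySem.List.len cs - 1) (-1) (-1))
      some (String.ofList (PySem.List.slice cs (some start) (some (e + 1))))

-- ===== PORT B =====
-- single pass: 'for ind, ch in enumerate(line): if ch.isdigit(): first = first if set else ind; last = ind'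
def stripScanB : List Char → Int → Option Int → Option Int → Option Int × Option Int
  | [], _, f, l => (f, l)
  | c :: rest, i, f, l =>
      if PySem.Chars.isdigit c then
        stripScanB rest (i + 1) (if f.isNone then some i else f) (some i)
      else stripScanB rest (i + 1) f l

def Strip_alt (line : String) : Option String :=
  let cs := line.toList
  match stripScanB cs 0 none none with
  | (some a, some b) => some (String.ofList (PySem.List.slice cs (some a) (some (b + 1))))
  | _ => none

-- ===== PRECONDITION & SPEC =====
def Spec_Strip (line : String) (out : Option String) : Prop := out = Strip_alt line
instance (line : String) (out : Option String) : Decidable (Spec_Strip line out) := by unfold Spec_Strip; infer_instance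

-- ===== CLAIM (what is proved, stated in full; the proofs are below) =====
def Claim_equal_Strip : Prop := ∀ (line : String), Dom_Strip line → Spec_Strip line (Strip line)

-- ===== LEMMAS AND PROOFS =====

-- once first is set, the scan never changes it
theorem scan_fst_some (cs : List Char) : ∀ (i a : Int) (l : Option Int),
    (stripScanB cs i (some a) l).1 = some a := by
  induction cs with
  | nil => intro i a l; rfl
  | cons c rest ih =>
      intro i a l
      simp only [stripScanB]
      split <;> simp [ih]

-- the scan's first component is A's forward for/else result
theorem scan_fst (cs : List Char) : ∀ (i : Int) (l : Option Int),
    (stripScanB cs i none l).1 = stripFwdA (PySem.List.enumerate cs i) := by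
  induction cs with
  | nil => intro i l; rfl
  | cons c rest ih =>
      intro i l
      rw [PySem.List.enumerate_cons]
      simp only [stripScanB, stripFwdA]
      split
      · simp [scan_fst_some]
      · exact ih _ _

-- first and last become set together
theorem scan_some_iff (cs : List Char) : ∀ (i : Int) (f l : Option Int),
    f.isSome = l.isSome →
    ((stripScanB cs i f l).1).isSome = ((stripScanB cs i f l).2).isSome := by
  induction cs with
  | nil => intro i f l h; exact h
  | cons c rest ih =>
      intro i f l h
      simp only [stripScanB]
      split
      · apply ih; cases f <;> simp
      · exact ih _ _ _ h

-- scanning one more character updates only the last index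
theorem scan_snd_append (cs : List Char) : ∀ (c : Char) (i : Int) (f l : Option Int),
    (stripScanB (cs ++ [c]) i f l).2 =
      if PySem.Chars.isdigit c then some (i + cs.length) else (stripScanB cs i f l).2 := by
  induction cs with
  | nil =>
      intro c i f l
      simp only [List.nil_append, stripScanB]
      split <;> simp
  | cons c' rest ih =>
      intro c i f l
      simp only [List.cons_append, stripScanB]
      split <;>
        · rw [ih]
          congr 2
          simp only [List.length_cons]
          push_cast
          omega

-- backward scan only reads the listed indices
theorem bwd_congr (idxs : List Int) : ∀ (cs cs' : List Char),
    (∀ i ∈ idxs, PySem.List.pyGetD cs i ' ' = PySem.List.pyGetD cs' i ' ') →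
    stripBwdA cs idxs = stripBwdA cs' idxs := by
  induction idxs with
  | nil => intro cs cs' _; rfl
  | cons j rest ih =>
      intro cs cs' h
      simp only [stripBwdA]
      rw [h j (by simp)]
      split
      · rfl
      · exact ih _ _ (fun i hi => h i (by simp [hi]))

-- the backward scan finds exactly the scan's last index
theorem bwd_eq_scan_snd (cs : List Char) : ∀ (b : Int),
    (stripScanB cs 0 none none).2 = some b →
    stripBwdA cs (PySem.List.pyRange (PySem.List.len cs - 1) (-1) (-1)) = b := by
  induction cs using List.reverseRecOn with
  | nil => intro b h; simp [stripScanB] at h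
  | append_singleton ds c ih =>
      intro b h
      rw [scan_snd_append] at h
      have hlen : PySem.List.len (ds ++ [c]) - 1 = (ds.length : Int) := by
        simp [PySem.List.len_eq]
      rw [hlen, PySem.List.pyRange_neg_one_cons (by omega)]
      have hget : PySem.List.pyGetD (ds ++ [c]) (ds.length : Int) ' ' = c := by
        simp [PySem.List.pyGetD_natCast]
      simp only [stripBwdA, hget]
      by_cases hd : PySem.Chars.isdigit c = true
      · rw [if_pos hd] at h ⊢
        simp only [Option.some.injEq] at h
        omega
      · rw [if_neg hd] at h ⊢
        rw [bwd_congr _ (ds ++ [c]) ds ?_]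
        · have := ih b h
          simpa [PySem.List.len_eq] using this
        · intro i hi
          rw [PySem.List.mem_pyRange_neg_one] at hi
          obtain ⟨k, rfl⟩ : ∃ k : Nat, i = (k : Int) :=
            ⟨i.toNat, (Int.toNat_of_nonneg (by omega)).symm⟩
          have hk : k < ds.length := by omega
          simp only [PySem.List.pyGetD_natCast, List.getD_eq_getElem?_getD,
            List.getElem?_append_left hk]

-- ===== VERDICT (by name: the statement is the Claim_ definition above) =====
theorem Strip_spec : Claim_equal_Strip := by
  intro line _
  unfold Spec_Strip Strip Strip_alt
  rcases hscan : stripScanB line.toList 0 none none with ⟨f, l⟩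
  have hfwd : stripFwdA (PySem.List.enumerate line.toList 0) =
      (stripScanB line.toList 0 none none).1 := (scan_fst line.toList 0 none).symm
  rw [hscan] at hfwd
  cases f with
  | none => simp [hfwd, hscan]
  | some a =>
      have hiff := scan_some_iff line.toList 0 none none rfl
      rw [hscan] at hiff
      cases l with
      | none => simp at hiff
      | some b =>
          have hb : stripBwdA line.toList
              (PySem.List.pyRange (PySem.List.len line.toList - 1) (-1) (-1)) = b := by
            apply bwd_eq_scan_snd
            rw [hscan]
          have hb' : stripBwdA line.toList
              (PySem.List.pyRange ((line.length : Int) - 1) (-1) (-1)) = b := by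
            simpa [PySem.List.len_eq] using hb
          simp [hfwd, hscan, hb']
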